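-- pv_equiv track=rewrite | github.com/ybaik/translation | gspecific/europe/gen_font_from_db.py | split_and_pair
-- ===== SOURCE A (Python) =====
-- def split_and_pair(text: str, pairs: set) -> None:
--     space = False
--     for i in range(0, len(text), 2):
--         pair = text[i : i + 2]
--
--         if " " in pair:
--             space = True
--
--         # 길이가 1이면 뒤에 "_" 추가
--         if len(pair) == 1:
--             pair += "_"
--         pairs.add(pair)
--     return space
-- ===== SOURCE B (Python) =====
-- def split_and_pair(text: str, pairs: set) -> None:
--     # Different algorithm: pad the text once to even length, then build the chunks by
--     # zipping the even-index and odd-index strided subsequences (no index loop, no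
--     # per-chunk slicing); the space flag is the closed form `' ' in text`, exact
--     # because the chunks partition the text. Mutates `pairs` in place like A.
--     padded = text + "_" if len(text) % 2 else text
--     pairs.update(a + b for a, b in zip(padded[::2], padded[1::2]))
--     return " " in text
-- ===== Notes on version B (the rewrite author's own statement) =====
-- stated objective: alternative
-- what changed: Instead of an index loop over stride-2 slices with an interleaved space flag, B pads the text once to even length, builds every chunk by zipping the two strided subsequences padded[::2] and padded[1::2], bulk-updates the set, and returns the closed-form membership test ' ' in text.
import Mathlib
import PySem

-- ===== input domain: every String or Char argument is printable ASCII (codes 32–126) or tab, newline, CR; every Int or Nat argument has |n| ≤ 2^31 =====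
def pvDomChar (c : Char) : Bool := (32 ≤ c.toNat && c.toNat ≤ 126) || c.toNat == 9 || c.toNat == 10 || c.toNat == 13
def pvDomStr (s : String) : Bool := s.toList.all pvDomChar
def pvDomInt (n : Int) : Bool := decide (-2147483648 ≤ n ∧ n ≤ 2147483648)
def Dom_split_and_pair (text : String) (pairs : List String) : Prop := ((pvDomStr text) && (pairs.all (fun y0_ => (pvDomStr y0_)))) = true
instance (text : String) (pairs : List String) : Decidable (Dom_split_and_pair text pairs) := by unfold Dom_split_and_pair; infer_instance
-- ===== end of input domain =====

-- B replaces A's index loop over stride-2 slices (with an interleaved space flag) by one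
-- even-length padding, a zip of the two strided subsequences padded[::2]/padded[1::2] to
-- build the chunks, a bulk set update, and the closed-form check `' ' in text`; same O(n).
-- Both A and B mutate the `pairs` set identically; the equivalence proved here is about the
-- returned Bool only (the List String argument models the set's contents at call time).


-- ===== PORT A =====
def split_and_pair (text : String) (pairs : List String) : Bool :=
  ((PySem.List.pyRange 0 (PySem.Str.len text) 2).foldl
    (fun st i =>
      let pair := PySem.Str.slice text (some i) (some (i + 2))
      let space := if PySem.Str.isIn " " pair then true else st.1
      let pair := if PySem.Str.len pair = 1 then pair ++ "_" else pair
      (space, PySem.Set.add st.2 pair))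
    (false, PySem.Set.ofList pairs)).1

-- ===== PORT B =====
def split_and_pair_alt (text : String) (pairs : List String) : Bool :=
  let padded := if PySem.Str.len text % 2 ≠ 0 then text ++ "_" else text
  let evens := (PySem.Str.slice? padded none none 2).getD ""
  let odds  := (PySem.Str.slice? padded (some 1) none 2).getD ""
  let chunks := (evens.toList.zip odds.toList).map (fun ab => String.ofList [ab.1, ab.2])
  let _pairs := PySem.Set.update (PySem.Set.ofList pairs) chunks
  PySem.Str.isIn " " text

-- ===== PRECONDITION & SPEC =====
def Spec_split_and_pair (text : String) (pairs : List String) (out : Bool) : Prop := out = split_and_pair_alt text pairs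
instance (text : String) (pairs : List String) (out : Bool) : Decidable (Spec_split_and_pair text pairs out) := by unfold Spec_split_and_pair; infer_instance

-- ===== CLAIM (what is proved, stated in full; the proofs are below) =====
def Claim_equal_split_and_pair : Prop := ∀ (text : String) (pairs : List String), Dom_split_and_pair text pairs → Spec_split_and_pair text pairs (split_and_pair text pairs)

-- ===== LEMMAS AND PROOFS =====

-- The space flag accumulated by A's fold is `init || any chunk contains ' '`.
theorem foldl_fst_if {α σ : Type} (l : List α) (p : α → Bool) (g : Bool × σ → α → σ)
    (b : Bool) (s : σ) :
    (l.foldl (fun st i => (if p i then true else st.1, g st i)) (b, s)).1 = (b || l.any p) := by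
  induction l generalizing b s with
  | nil => simp
  | cons a t ih =>
    simp only [List.foldl_cons, List.any_cons, ih]
    cases p a <;> simp

theorem singleton_infix_iff {α : Type} (a : α) (l : List α) : [a] <:+: l ↔ a ∈ l := by
  constructor
  · rintro ⟨s, t, rfl⟩; simp
  · intro h
    obtain ⟨s, t, rfl⟩ := List.append_of_mem h
    exact ⟨s, t, by simp⟩

-- The 2-char chunks starting at even indices cover the whole list, so
-- "some chunk contains ' '" is exactly "' ' appears in the list".
theorem any_chunk_space (cs : List Char) :
    ((PySem.List.pyRange 0 (cs.length : Int) 2).any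
      (fun i => PySem.Chars.isIn [' '] (PySem.List.slice cs (some i) (some (i + 2)))))
    = PySem.Chars.isIn [' '] cs := by
  rcases h : PySem.Chars.isIn [' '] cs with _ | _
  · rw [PySem.Chars.isIn_eq_false_iff, singleton_infix_iff] at h
    simp only [List.any_eq_false]
    intro i hi
    rw [PySem.List.mem_pyRange_iff_of_pos (by norm_num)] at hi
    obtain ⟨h0, hlt, _⟩ := hi
    rw [Bool.not_eq_true, PySem.Chars.isIn_eq_false_iff, singleton_infix_iff]
    intro hmem
    exact h (PySem.List.mem_of_mem_slice _ _ _ hmem)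
  · rw [PySem.Chars.isIn_iff_infix, singleton_infix_iff] at h
    obtain ⟨j, hj, hje⟩ := List.mem_iff_getElem.mp h
    simp only [List.any_eq_true]
    refine ⟨(2 * (j / 2) : Nat), ?_, ?_⟩
    · rw [PySem.List.mem_pyRange_iff_of_pos (by norm_num)]
      refine ⟨by positivity, ?_, ⟨(j / 2 : Nat), by push_cast; ring⟩⟩
      have h2j : 2 * (j / 2) ≤ j := by omega
      exact_mod_cast lt_of_le_of_lt h2j hj
    · rw [PySem.Chars.isIn_iff_infix, singleton_infix_iff]
      rw [PySem.List.slice_toNat cs (by positivity) (by positivity)]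
      have hile : 2 * (j / 2) ≤ j := by omega
      have hjlt : j < 2 * (j / 2) + 2 := by omega
      have h1 : ((2 * (j / 2) : Nat) : Int).toNat = 2 * (j / 2) := by omega
      have h2 : (((2 * (j / 2) : Nat) : Int) + 2).toNat = 2 * (j / 2) + 2 := by omega
      rw [h1, h2]
      have hlen : j - 2 * (j / 2) < (cs.drop (2 * (j / 2))).length := by
        simp [List.length_drop]; omega
      have : (List.take (2 * (j / 2) + 2 - 2 * (j / 2)) (cs.drop (2 * (j / 2))))[j - 2 * (j / 2)]'(by
          simp [List.length_take, List.length_drop]; omega) = cs[j] := by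
        rw [List.getElem_take, List.getElem_drop]
        congr 1; omega
      rw [← hje, ← this]
      exact List.getElem_mem _

-- ===== VERDICT (by name: the statement is the Claim_ definition above) =====
theorem split_and_pair_spec : Claim_equal_split_and_pair := by
  intro text pairs _
  unfold Spec_split_and_pair split_and_pair_alt
  show (((PySem.List.pyRange 0 (PySem.Str.len text) 2).foldl
      (fun st i =>
        (if PySem.Str.isIn " " (PySem.Str.slice text (some i) (some (i + 2))) then true else st.1,
         PySem.Set.add st.2
           (if PySem.Str.len (PySem.Str.slice text (some i) (some (i + 2))) = 1
            then PySem.Str.slice text (some i) (some (i + 2)) ++ "_"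
            else PySem.Str.slice text (some i) (some (i + 2)))))
      (false, PySem.Set.ofList pairs)).1 = PySem.Str.isIn " " text)
  rw [foldl_fst_if, Bool.false_or]
  simpa using any_chunk_space text.toList
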